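-- pv_equiv track=rewrite | github.com/sudhanshushekr/Leetcode-Roadmap | 10-backtracking/permutations.py | permute_heap_algorithm
-- ===== SOURCE A (Python) =====
-- from typing import List
--
-- def permute_heap_algorithm(nums: List[int]) -> List[List[int]]:
--     """
--     Approach 4: Heap's Algorithm - Generate permutations by adjacent swaps
--
--     Algorithm:
--     1. Use Heap's algorithm for generating permutations
--     2. Generate permutations by swapping adjacent elements
--     3. More efficient than standard backtracking
--
--     Time Complexity: O(n!) - n! permutations
--     Space Complexity: O(n) - Recursion stack
--
--     Analysis:
--     - Pros: Efficient algorithm, minimal swaps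
--     - Cons: More complex implementation
--     """
--     def generate_permutations(n):
--         if n == 1:
--             result.append(nums[:])
--             return
--
--         for i in range(n):
--             generate_permutations(n - 1)
--
--             # Swap based on whether n is odd or even
--             if n % 2 == 1:
--                 nums[0], nums[n - 1] = nums[n - 1], nums[0]
--             else:
--                 nums[i], nums[n - 1] = nums[n - 1], nums[i]
--
--     result = []
--     generate_permutations(len(nums))
--     return result
-- ===== SOURCE B (Python) =====
-- from typing import List
--
-- def permute_heap_algorithm(nums: List[int]) -> List[List[int]]:
--     # Pure recursion: instead of threading the mutated array through the
--     # recursion, use the closed-form net effect of each level (identity for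
--     # odd m, a rotation for the per-iteration step) and keep gen side-effect
--     # free.  Same output order as A; does NOT mutate nums (A does).
--     def gen(m: int, arr: List[int]) -> List[List[int]]:
--         if m <= 1:
--             return [list(arr)] if m == 1 else []
--         out: List[List[int]] = []
--         for i in range(m):
--             out.extend(gen(m - 1, arr))
--             if m % 2 == 1:
--                 # net of (gen(m-1); swap(0, m-1)) = rotate prefix of length m right
--                 arr = [arr[m - 1]] + arr[:m - 1] + arr[m:]
--             else:
--                 arr = list(arr)
--                 arr[i], arr[m - 1] = arr[m - 1], arr[i]
--         return out
--     return gen(len(nums), list(nums))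
-- ===== Notes on version B (the rewrite author's own statement) =====
-- stated objective: alternative
-- what changed: B replaces A's state-threading recursion (each recursive call mutates the shared array) by a side-effect-free recursion that applies the closed-form net permutation of each loop iteration (a prefix rotation for odd levels, a single swap for even levels) to a local copy, emitting the identical Heap-order sequence without mutating the input.
import Mathlib
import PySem

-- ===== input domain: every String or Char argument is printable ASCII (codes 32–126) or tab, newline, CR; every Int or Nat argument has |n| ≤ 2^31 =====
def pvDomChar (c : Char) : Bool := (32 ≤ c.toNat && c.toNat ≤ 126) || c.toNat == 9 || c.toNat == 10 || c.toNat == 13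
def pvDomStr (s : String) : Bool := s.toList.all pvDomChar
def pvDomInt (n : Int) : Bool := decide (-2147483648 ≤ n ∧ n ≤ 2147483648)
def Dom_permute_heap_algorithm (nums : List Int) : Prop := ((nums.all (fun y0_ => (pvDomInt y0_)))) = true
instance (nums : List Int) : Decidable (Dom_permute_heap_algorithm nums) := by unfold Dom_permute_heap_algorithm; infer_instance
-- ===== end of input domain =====

-- B replaces A's state-threading Heap recursion by a pure recursion applying closed-form net
-- rotations; equivalence concerns the RETURN value only (Python A mutates nums in place, B does not).

-- ===== PORT A =====
-- Python's simultaneous 'nums[i], nums[j] = nums[j], nums[i]' (both ports only ever use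
-- in-range indices here, so getD's default is never read)
def pySwap (l : List Int) (i j : Nat) : List Int :=
  (l.set i (l.getD j 0)).set j (l.getD i 0)

-- generate_permutations(n), threading the mutated state (nums, result)
def genA : Nat → List Int × List (List Int) → List Int × List (List Int)
  | 0, st => st                                   -- n = 0: range(0) loop body never runs, nothing appended
  | 1, st => (st.1, st.2 ++ [st.1])               -- result.append(nums[:])
  | (n+2), st =>
    (List.range (n+2)).foldl (fun st i =>
      let st' := genA (n+1) st
      let a := if (n+2) % 2 = 1 then pySwap st'.1 0 (n+1) else pySwap st'.1 i (n+1)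
      (a, st'.2)) st

def permute_heap_algorithm (nums : List Int) : List (List Int) :=
  (genA nums.length (nums, [])).2

-- ===== PORT B =====
-- '[arr[m-1]] + arr[:m-1] + arr[m:]' — the slices are take/drop since 0 ≤ m-1 ≤ m ≤ len(arr) here
def rotStep (m : Nat) (a : List Int) : List Int :=
  a.getD (m-1) 0 :: (a.take (m-1) ++ a.drop m)

-- pure gen(m, arr): the recursion passes arr unchanged; the loop rebinds a local copy
def genB : Nat → List Int → List (List Int)
  | 0, _ => []
  | 1, a => [a]
  | (m+2), a =>
    ((List.range (m+2)).foldl (fun st i =>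
      let out := st.2 ++ genB (m+1) st.1
      let a' := if (m+2) % 2 = 1 then rotStep (m+2) st.1 else pySwap st.1 i (m+1)
      (a', out)) (a, ([] : List (List Int)))).2

def permute_heap_algorithm_alt (nums : List Int) : List (List Int) :=
  genB nums.length nums

-- ===== PRECONDITION & SPEC =====
def Spec_permute_heap_algorithm (nums : List Int) (out : List (List Int)) : Prop := out = permute_heap_algorithm_alt nums
instance (nums : List Int) (out : List (List Int)) : Decidable (Spec_permute_heap_algorithm nums out) := by unfold Spec_permute_heap_algorithm; infer_instance

-- ===== CLAIM (what is proved, stated in full; the proofs are below) =====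
def Claim_equal_permute_heap_algorithm : Prop := ∀ (nums : List Int), Dom_permute_heap_algorithm nums → Spec_permute_heap_algorithm nums (permute_heap_algorithm nums)

-- ===== LEMMAS AND PROOFS =====

-- the net effect of genA n on the array component: identity for n < 2 or odd n,
-- the prefix rotation rotStep n for even n ≥ 2
def netA (n : Nat) (a : List Int) : List Int :=
  if 2 ≤ n ∧ n % 2 = 0 then rotStep n a else a

lemma pySwap_getElem (l : List Int) (i j k : Nat) (hi : i < l.length) (hj : j < l.length)
    (hk : k < l.length) :
    (pySwap l i j)[k]'(by simp [pySwap]; omega) = if k = j then l[i] else if k = i then l[j] else l[k] := by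
  simp only [pySwap, List.getElem_set, List.getD_eq_getElem?_getD, List.getElem?_eq_getElem hi,
    List.getElem?_eq_getElem hj, Option.getD_some]
  split_ifs with h1 h2 h3 h4 <;> first | rfl | omega

lemma rotStep_getElem (m : Nat) (l : List Int) (k : Nat) (hm : 1 ≤ m) (h : m ≤ l.length)
    (hk : k < l.length) :
    (rotStep m l)[k]'(by simp [rotStep]; omega) = if k = 0 then l[m-1]'(by omega) else if k < m then l[k-1]'(by omega) else l[k] := by
  rcases k with _ | k
  · simp [rotStep, List.getD_eq_getElem?_getD, List.getElem?_eq_getElem (show m-1 < l.length by omega)]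
  · simp only [rotStep, List.getElem_cons_succ]
    by_cases hkm : k + 1 < m
    · rw [List.getElem_append_left (by simp; omega)]
      simp [hkm]
    · rw [List.getElem_append_right (by simp; omega)]
      simp only [List.getElem_drop, List.length_take]
      have hne : ¬ (k + 1 = 0) := by omega
      simp only [hne, if_false, if_neg (by omega : ¬ k + 1 < m)]
      congr 1
      omega

lemma pySwap_length (l : List Int) (i j : Nat) : (pySwap l i j).length = l.length := by
  simp [pySwap]

lemma rotStep_length (m : Nat) (l : List Int) (hm : 1 ≤ m) (h : m ≤ l.length) :
    (rotStep m l).length = l.length := by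
  simp [rotStep]; omega

lemma swap_rot (n : Nat) (l : List Int) (h2 : 2 ≤ n) (h : n ≤ l.length) :
    pySwap (rotStep (n-1) l) 0 (n-1) = rotStep n l := by
  have hr : (rotStep (n-1) l).length = l.length := rotStep_length _ _ (by omega) (by omega)
  apply List.ext_getElem
  · rw [pySwap_length, hr, rotStep_length n l (by omega) h]
  · intro k hk1 hk2
    have hkl : k < l.length := by rwa [pySwap_length, hr] at hk1
    have hkr : k < (rotStep (n-1) l).length := by omega
    rw [pySwap_getElem _ 0 (n-1) k (by omega) (by omega) hkr,
        rotStep_getElem n l k (by omega) h hkl,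
        rotStep_getElem (n-1) l 0 (by omega) (by omega) (by omega),
        rotStep_getElem (n-1) l (n-1) (by omega) (by omega) (by omega),
        rotStep_getElem (n-1) l k (by omega) (by omega) hkl]
    split_ifs <;> first | rfl | omega | (congr 1; omega)

lemma foldl_const_iterate (f : List Int → List Int) : ∀ (n : Nat) (x : List Int),
    (List.range n).foldl (fun a _ => f a) x = f^[n] x := by
  intro n
  induction n with
  | zero => intro x; rfl
  | succ n ih => intro x; rw [List.range_succ, List.foldl_append, ih, Function.iterate_succ_apply']
                 rfl

lemma rot_iter_len (n : Nat) (l : List Int) (hn : 1 ≤ n) (h : n ≤ l.length) : ∀ (k : Nat),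
    ((rotStep n)^[k] l).length = l.length := by
  intro k
  induction k with
  | zero => rfl
  | succ k ih =>
    rw [Function.iterate_succ_apply', rotStep_length n _ (by omega) (by omega)]; exact ih

lemma rot_iter (n : Nat) (l : List Int) (hn : 1 ≤ n) (h : n ≤ l.length) : ∀ (k : Nat),
    ∀ j (hj : j < l.length), ((rotStep n)^[k] l)[j]'((rot_iter_len n l hn h k).symm ▸ hj) =
      if j < n then l[(j + k * (n-1)) % n]'(Nat.lt_of_lt_of_le (Nat.mod_lt _ (by omega)) h) else l[j] := by
  intro k
  induction k with
  | zero =>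
    intro j hj
    simp only [Function.iterate_zero, id]
    split_ifs with hjn
    · congr 1; rw [Nat.mul_comm]; simp [Nat.mod_eq_of_lt hjn]
    · rfl
  | succ k ih =>
    have hlen := rot_iter_len n l hn h k
    intro j hj
    simp only [Function.iterate_succ_apply']
    rw [rotStep_getElem n _ j (by omega) (by omega) (by omega)]
    by_cases hj0 : j = 0
    · subst hj0
      rw [if_pos rfl, ih (n-1) (by omega), if_pos (by omega)]
      rw [if_pos (by omega : 0 < n)]
      congr 2
      have h1 : (k+1) * (n-1) = k * (n-1) + (n-1) := by ring
      omega
    · rw [if_neg hj0]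
      by_cases hjn : j < n
      · rw [if_pos hjn, ih (j-1) (by omega), if_pos (by omega), if_pos hjn]
        congr 1
        have e1 : j + (k+1) * (n-1) = (j - 1 + k * (n-1)) + n := by
          have : (k+1) * (n-1) = k * (n-1) + (n-1) := by ring
          omega
        rw [e1, Nat.add_mod_right]
      · rw [if_neg hjn, ih j hj, if_neg hjn, if_neg hjn]

lemma rot_iter_id (n : Nat) (l : List Int) (hn : 1 ≤ n) (h : n ≤ l.length) :
    (rotStep n)^[n] l = l := by
  apply List.ext_getElem (rot_iter_len n l hn h n)
  intro j hj1 hj2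
  rw [rot_iter n l hn h n j hj2]
  split_ifs with hjn
  · congr 1
    have : j + n * (n-1) = j + (n-1) * n := by ring
    rw [this, Nat.add_mul_mod_self_right, Nat.mod_eq_of_lt hjn]
  · rfl

lemma swap_fold_len (n : Nat) (l : List Int) : ∀ (t : Nat),
    ((List.range t).foldl (fun a i => pySwap a i (n-1)) l).length = l.length := by
  intro t
  induction t with
  | zero => rfl
  | succ t ih => rw [List.range_succ, List.foldl_append, List.foldl_cons, List.foldl_nil,
                     pySwap_length]; exact ih

lemma swap_fold_inv (n : Nat) (l : List Int) (h2 : 2 ≤ n) (h : n ≤ l.length) : ∀ (t : Nat),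
    ∀ (ht : t ≤ n-1),
    ∀ j (hj : j < l.length), ((List.range t).foldl (fun a i => pySwap a i (n-1)) l)[j]'((swap_fold_len n l t).symm ▸ hj) =
      if t = 0 then l[j] else if j = 0 then l[n-1]'(by omega) else if j < t then l[j-1]'(by omega)
      else if j = n-1 then l[t-1]'(by omega) else l[j] := by
  intro t
  induction t with
  | zero => intro _ j hj; simp
  | succ t ih =>
    intro ht j hj
    have hlen := swap_fold_len n l t
    simp only [List.range_succ, List.foldl_append, List.foldl_cons, List.foldl_nil]
    rw [pySwap_getElem _ t (n-1) j (by rw [hlen]; omega) (by rw [hlen]; omega) (by rw [hlen]; omega)]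
    rw [if_neg (by omega : ¬ (t + 1 = 0))]
    by_cases hjn : j = n-1
    · rw [if_pos (by omega), ih (by omega) t (by omega)]
      split_ifs <;> first | rfl | omega
    · rw [if_neg (by omega : ¬ (j = n-1))]
      by_cases hjt : j = t
      · subst hjt
        rw [if_pos rfl, ih (by omega) (n-1) (by omega)]
        split_ifs <;> first | rfl | omega
      · rw [if_neg hjt, ih (by omega) j hj]
        split_ifs <;> first | rfl | omega

lemma pySwap_self (l : List Int) (i : Nat) (hi : i < l.length) : pySwap l i i = l := by
  apply List.ext_getElem (by rw [pySwap_length])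
  intro j hj1 hj2
  rw [pySwap_getElem l i i j hi hi hj2]
  split_ifs with h1 h2 <;> first | rfl | (subst h1; rfl)

lemma swap_fold_rot (n : Nat) (l : List Int) (h2 : 2 ≤ n) (h : n ≤ l.length) :
    (List.range n).foldl (fun a i => pySwap a i (n-1)) l = rotStep n l := by
  have hstep : (List.range n) = List.range (n-1) ++ [n-1] := by
    rw [← List.range_succ]; congr 1; omega
  rw [hstep, List.foldl_append, List.foldl_cons, List.foldl_nil,
      pySwap_self _ _ (by rw [swap_fold_len]; omega)]
  apply List.ext_getElem (by rw [swap_fold_len, rotStep_length n l (by omega) h])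
  intro j hj1 hj2
  have hjl : j < l.length := by rwa [swap_fold_len] at hj1
  rw [swap_fold_inv n l h2 h (n-1) le_rfl j hjl,
      rotStep_getElem n l j (by omega) h hjl]
  split_ifs <;> first | rfl | omega | (congr 1; omega)

lemma foldl_inv_eq {σ : Type} (P : σ → Prop) (f g : σ → Nat → σ)
    (hfg : ∀ s i, P s → f s i = g s i) (hP : ∀ s i, P s → P (g s i)) :
    ∀ (is : List Nat) (s : σ), P s → List.foldl f s is = List.foldl g s is := by
  intro is
  induction is with
  | nil => intro s _; rfl
  | cons i is ih =>
    intro s hs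
    simp only [List.foldl_cons]
    rw [hfg s i hs, ih _ (hP s i hs)]

lemma foldl_shift (f1 : List Int → Nat → List Int) (em : List Int → List (List Int)) :
    ∀ (is : List Nat) (a : List Int) (r : List (List Int)),
    List.foldl (fun st i => (f1 st.1 i, st.2 ++ em st.1)) (a, r) is
      = ((List.foldl (fun st i => (f1 st.1 i, st.2 ++ em st.1)) (a, []) is).1,
         r ++ (List.foldl (fun st i => (f1 st.1 i, st.2 ++ em st.1)) (a, []) is).2) := by
  intro is
  induction is with
  | nil => intro a r; simp
  | cons i is ih =>
    intro a r
    simp only [List.foldl_cons]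
    rw [ih (f1 a i) (r ++ em a), ih (f1 a i) ([] ++ em a)]
    simp

lemma genA_eq : ∀ (n : Nat) (a : List Int) (r : List (List Int)), n ≤ a.length →
    genA n (a, r) = (netA n a, r ++ genB n a) := by
  intro n
  induction n using Nat.strong_induction_on with
  | _ n ih =>
    match n with
    | 0 => intro a r _; simp [genA, genB, netA]
    | 1 => intro a r _; simp [genA, genB, netA]
    | (m+2) =>
      intro a r hlen
      have ih1 := ih (m+1) (by omega)
      -- step 1: replace A's fold body by B's (invariant: array length fixed)
      have hcong : genA (m+2) (a, r) =
          (List.range (m+2)).foldl (fun st i =>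
            (if (m+2) % 2 = 1 then rotStep (m+2) st.1 else pySwap st.1 i (m+1),
             st.2 ++ genB (m+1) st.1)) (a, r) := by
        show (List.range (m+2)).foldl _ (a, r) = _
        apply foldl_inv_eq (fun st : List Int × List (List Int) => st.1.length = a.length)
        · intro s i hs
          rw [ih1 s.1 s.2 (by omega)]
          simp only []
          congr 1
          by_cases hodd : (m+2) % 2 = 1
          · rw [if_pos hodd, if_pos hodd]
            have : netA (m+1) s.1 = rotStep (m+1) s.1 := by
              unfold netA; rw [if_pos (by omega)]
            rw [this]
            have := swap_rot (m+2) s.1 (by omega) (by omega)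
            simpa using this
          · rw [if_neg hodd, if_neg hodd]
            have : netA (m+1) s.1 = s.1 := by
              unfold netA; rw [if_neg (by omega)]
            rw [this]
        · intro s i hs
          simp only []
          split_ifs with hodd
          · rw [rotStep_length _ _ (by omega) (by omega)]; exact hs
          · rw [pySwap_length]; exact hs
        · rfl
      rw [hcong, foldl_shift (fun x i => if (m+2) % 2 = 1 then rotStep (m+2) x else pySwap x i (m+1)) (fun x => genB (m+1) x)]
      congr 1
      -- array component: fold of the pure step = netA (m+2)
      have hfst : ∀ (is : List Nat) (x : List Int) (rr : List (List Int)),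
          (List.foldl (fun st i => ((fun x i => if (m+2) % 2 = 1 then rotStep (m+2) x else pySwap x i (m+1)) st.1 i, st.2 ++ genB (m+1) st.1)) (x, rr) is).1
            = List.foldl (fun x i => if (m+2) % 2 = 1 then rotStep (m+2) x else pySwap x i (m+1)) x is := by
        intro is
        induction is with
        | nil => intro x rr; rfl
        | cons i is ih2 => intro x rr; simp only [List.foldl_cons]; exact ih2 _ _
      rw [hfst]
      by_cases hodd : (m+2) % 2 = 1
      · have hc : (fun (x : List Int) (i : Nat) => if (m+2) % 2 = 1 then rotStep (m+2) x else pySwap x i (m+1))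
            = fun x _ => rotStep (m+2) x := by
          funext x i; rw [if_pos hodd]
        rw [hc, foldl_const_iterate (rotStep (m+2)) (m+2) a,
            rot_iter_id (m+2) a (by omega) hlen]
        unfold netA
        rw [if_neg (by omega)]
      · have hc : (fun (x : List Int) (i : Nat) => if (m+2) % 2 = 1 then rotStep (m+2) x else pySwap x i (m+1))
            = fun x i => pySwap x i (m+2-1) := by
          funext x i; rw [if_neg hodd]; norm_num
        rw [hc, swap_fold_rot (m+2) a (by omega) hlen]
        unfold netA
        rw [if_pos (by omega)]

-- ===== VERDICT (by name: the statement is the Claim_ definition above) =====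
theorem permute_heap_algorithm_spec : Claim_equal_permute_heap_algorithm := by
  intro nums _
  unfold Spec_permute_heap_algorithm permute_heap_algorithm permute_heap_algorithm_alt
  rw [genA_eq nums.length nums [] le_rfl]
  simp
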